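-- pv_equiv track=rewrite | github.com/hsgser/clafusion | align_layers.py | align_to_transfer_map
-- ===== SOURCE A (Python) =====
-- def align_to_transfer_map(mapping, model_type):
--     """Assume that the last layer of vgg or resnet is a FC layer."""
--     if model_type == "vgg":
--         return mapping[:-1]
--     new_mapping = []
--
--     for idx in mapping:
--         if idx in [9, 18, 31]:
--             continue
--         elif idx > 31:
--             new_mapping.append(idx - 3)
--         elif idx > 18:
--             new_mapping.append(idx - 2)
--         elif idx > 9:
--             new_mapping.append(idx - 1)
--         else:
--             new_mapping.append(idx)
--
--     return new_mapping
-- ===== SOURCE B (Python) =====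
-- def align_to_transfer_map(mapping, model_type):
--     if model_type == "vgg":
--         return mapping[:-1]
--     out = [x for x in mapping if x not in (9, 18, 31)]
--     # One decrement pass per removed layer, from the highest skip down:
--     # every surviving index above that skip slides down by one.
--     for s in (31, 18, 9):
--         out = [x - 1 if x > s else x for x in out]
--     return out
-- ===== Notes on version B (the rewrite author's own statement) =====
-- stated objective: alternative
-- what changed: Replaces A's single pass with a hardcoded elif threshold cascade by staged passes: filter the sentinels once, then one whole-list decrement pass per skip value in descending order.
import Mathlib
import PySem

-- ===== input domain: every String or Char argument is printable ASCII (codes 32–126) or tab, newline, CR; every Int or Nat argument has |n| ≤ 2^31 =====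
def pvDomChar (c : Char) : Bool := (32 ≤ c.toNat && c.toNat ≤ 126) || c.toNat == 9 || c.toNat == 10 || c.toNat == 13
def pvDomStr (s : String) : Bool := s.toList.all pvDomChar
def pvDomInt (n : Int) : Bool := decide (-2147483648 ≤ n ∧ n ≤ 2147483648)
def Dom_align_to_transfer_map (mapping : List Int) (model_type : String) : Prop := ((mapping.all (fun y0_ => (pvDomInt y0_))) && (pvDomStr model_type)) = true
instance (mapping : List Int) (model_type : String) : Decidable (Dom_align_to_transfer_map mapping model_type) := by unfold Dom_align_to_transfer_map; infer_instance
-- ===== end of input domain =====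

-- B replaces A's single-pass elif threshold cascade by staged passes: filter the sentinels once, then one whole-list decrement pass per skip in descending order (objective: alternative).

-- ===== PORT A =====
-- Port of A: foldl over mapping building new_mapping, same branch order as the Python.
def align_to_transfer_map (mapping : List Int) (model_type : String) : List Int :=
  if model_type == "vgg" then PySem.List.slice mapping none (some (-1))
  else
    mapping.foldl (fun new_mapping idx =>
      if idx ∈ [(9:Int), 18, 31] then new_mapping
      else if idx > 31 then new_mapping ++ [idx - 3]
      else if idx > 18 then new_mapping ++ [idx - 2]
      else if idx > 9 then new_mapping ++ [idx - 1]
      else new_mapping ++ [idx]) []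

-- ===== PORT B =====
-- Port of B: filter the sentinels once, then fold over the skips (descending),
-- each step one whole-list decrement pass.
def align_to_transfer_map_alt (mapping : List Int) (model_type : String) : List Int :=
  if model_type == "vgg" then mapping.dropLast
  else
    [(31:Int), 18, 9].foldl
      (fun out s => out.map (fun x => if x > s then x - 1 else x))
      (mapping.filter (fun x => x ∉ [(9:Int), 18, 31]))

-- ===== PRECONDITION & SPEC =====
def Spec_align_to_transfer_map (mapping : List Int) (model_type : String) (out : List Int) : Prop := out = align_to_transfer_map_alt mapping model_type
instance (mapping : List Int) (model_type : String) (out : List Int) : Decidable (Spec_align_to_transfer_map mapping model_type out) := by unfold Spec_align_to_transfer_map; infer_instance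

-- ===== CLAIM (what is proved, stated in full; the proofs are below) =====
def Claim_equal_align_to_transfer_map : Prop := ∀ (mapping : List Int) (model_type : String), Dom_align_to_transfer_map mapping model_type → Spec_align_to_transfer_map mapping model_type (align_to_transfer_map mapping model_type)

-- ===== LEMMAS AND PROOFS =====

-- A's loop equals: filter out the sentinels, then map A's branch cascade.
theorem pv_loopA (mapping : List Int) (acc : List Int) :
    mapping.foldl (fun new_mapping idx =>
      if idx ∈ [(9:Int), 18, 31] then new_mapping
      else if idx > 31 then new_mapping ++ [idx - 3]
      else if idx > 18 then new_mapping ++ [idx - 2]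
      else if idx > 9 then new_mapping ++ [idx - 1]
      else new_mapping ++ [idx]) acc
    = acc ++ (mapping.filter (fun x => x ∉ [(9:Int), 18, 31])).map
        (fun x => if x > 31 then x - 3 else if x > 18 then x - 2 else if x > 9 then x - 1 else x) := by
  induction mapping generalizing acc with
  | nil => simp
  | cons x xs ih =>
    rw [List.foldl_cons, List.filter_cons]
    by_cases hm : x ∈ [(9:Int), 18, 31]
    · have hd : decide (x ∉ [(9:Int), 18, 31]) = false := by simp [hm]
      rw [if_pos hm, ih, hd, if_neg Bool.false_ne_true]
    · have hpush : (if x ∈ [(9:Int), 18, 31] then acc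
          else if x > 31 then acc ++ [x - 3]
          else if x > 18 then acc ++ [x - 2]
          else if x > 9 then acc ++ [x - 1]
          else acc ++ [x])
          = acc ++ [if x > 31 then x - 3 else if x > 18 then x - 2 else if x > 9 then x - 1 else x] := by
        rw [if_neg hm]; split_ifs <;> rfl
      have hd : decide (x ∉ [(9:Int), 18, 31]) = true := by simp [hm]
      rw [hpush, ih, hd, if_pos rfl, List.map_cons]
      simp

-- B's three staged decrement passes, composed on one element, equal A's cascade.
theorem pv_elem (x : Int) :
    (if (if (if x > 31 then x - 1 else x) > 18 then (if x > 31 then x - 1 else x) - 1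
         else (if x > 31 then x - 1 else x)) > 9
     then (if (if x > 31 then x - 1 else x) > 18 then (if x > 31 then x - 1 else x) - 1
           else (if x > 31 then x - 1 else x)) - 1
     else (if (if x > 31 then x - 1 else x) > 18 then (if x > 31 then x - 1 else x) - 1
           else (if x > 31 then x - 1 else x)))
    = (if x > 31 then x - 3 else if x > 18 then x - 2 else if x > 9 then x - 1 else x) := by
  split_ifs <;> omega

-- ===== VERDICT (by name: the statement is the Claim_ definition above) =====
theorem align_to_transfer_map_spec : Claim_equal_align_to_transfer_map := by
  intro mapping model_type _
  unfold Spec_align_to_transfer_map align_to_transfer_map align_to_transfer_map_alt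
  by_cases h : model_type == "vgg"
  · simp [h, PySem.List.slice_to_neg_one]
  · rw [if_neg (by simpa using h), if_neg (by simpa using h)]
    rw [pv_loopA mapping []]
    simp only [List.foldl_cons, List.foldl_nil, List.map_map, List.nil_append]
    apply List.map_congr_left
    intro x _
    simpa [Function.comp] using (pv_elem x).symm
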